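-- pv_equiv track=rewrite | github.com/eclipsevortex/SubVortex | scripts/firewall/firewall_deactivate.py | update_firewall_args
-- ===== SOURCE A (Python) =====
-- from typing import List
--
-- def update_firewall_args(process_args: List[str] = []):
--     updated_args = []
--     i = 0
--
--     while i < len(process_args):
--         if process_args[i].startswith("--firewall."):
--             if i + 1 < len(process_args) and not process_args[i + 1].startswith("--"):
--                 i += 2
--             else:
--                 i += 1
--         else:
--             updated_args.append(process_args[i])
--             i += 1
--
--     return updated_args
-- ===== SOURCE B (Python) =====
-- from typing import List
--
-- def update_firewall_args(process_args: List[str] = []):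
--     # Stateless pairwise filter: a token is dropped iff it is itself a
--     # firewall flag, or its immediate predecessor is a firewall flag and the
--     # token does not start with "--" (it was that flag's value). Correct
--     # because a value never starts with "--", so a "--firewall." token can
--     # never have been consumed as a value itself.
--     return [
--         tok
--         for prev, tok in zip([None] + list(process_args), process_args)
--         if not tok.startswith("--firewall.")
--         and not (prev is not None
--                  and prev.startswith("--firewall.")
--                  and not tok.startswith("--"))
--     ]
-- ===== Notes on version B (the rewrite author's own statement) =====
-- stated objective: alternative
-- what changed: Replaced A's stateful index-jumping while loop with a stateless pairwise filter: tokens are zipped with their predecessor and a token is kept iff it is not a firewall flag and not the non-'--' value following one (valid because a '--firewall.' token can never be consumed as a value).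
import Mathlib
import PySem

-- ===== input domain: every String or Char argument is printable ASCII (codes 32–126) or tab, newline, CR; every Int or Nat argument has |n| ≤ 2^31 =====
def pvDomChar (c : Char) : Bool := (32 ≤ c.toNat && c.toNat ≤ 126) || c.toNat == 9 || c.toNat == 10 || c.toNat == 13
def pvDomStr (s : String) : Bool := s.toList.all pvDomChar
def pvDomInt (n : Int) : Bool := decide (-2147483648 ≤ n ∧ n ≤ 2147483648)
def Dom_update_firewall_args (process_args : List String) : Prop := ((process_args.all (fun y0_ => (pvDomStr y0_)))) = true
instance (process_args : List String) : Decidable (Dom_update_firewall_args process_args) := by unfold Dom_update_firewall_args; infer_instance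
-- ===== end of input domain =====

-- B replaces A's stateful index-jumping loop by a stateless pairwise (predecessor, token) filter; alternative decomposition, same cost.

-- ===== PORT A =====
-- A: while loop with index that jumps by 2 to consume a flag's value; ported as
-- structural recursion on the remaining suffix with the same one-token lookahead.
def pvLoopA : List String → List String
  | [] => []
  | x :: rest =>
    if PySem.Str.startswith x "--firewall." then
      match rest with
      | y :: rest' =>
        if ¬ PySem.Str.startswith y "--" then pvLoopA rest' else pvLoopA (y :: rest')
      | [] => pvLoopA []
    else x :: pvLoopA rest

def update_firewall_args (process_args : List String) : List String :=
  pvLoopA process_args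

-- ===== PORT B =====
-- B: stateless filter of each token paired with its predecessor (zip with None-prefixed list).
def pvKeepB (prev : Option String) (tok : String) : Bool :=
  !(PySem.Str.startswith tok "--firewall.") &&
  !((match prev with
     | some p => PySem.Str.startswith p "--firewall."
     | none => false) && !(PySem.Str.startswith tok "--"))

def update_firewall_args_alt (process_args : List String) : List String :=
  (((((none : Option String) :: process_args.map some).zip process_args).filter
      (fun pt => pvKeepB pt.1 pt.2)).map (fun pt => pt.2))

-- ===== PRECONDITION & SPEC =====
def Spec_update_firewall_args (process_args : List String) (out : List String) : Prop := out = update_firewall_args_alt process_args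
instance (process_args : List String) (out : List String) : Decidable (Spec_update_firewall_args process_args out) := by unfold Spec_update_firewall_args; infer_instance

-- ===== CLAIM (what is proved, stated in full; the proofs are below) =====
def Claim_equal_update_firewall_args : Prop := ∀ (process_args : List String), Dom_update_firewall_args process_args → Spec_update_firewall_args process_args (update_firewall_args process_args)

-- ===== LEMMAS AND PROOFS =====

-- recursive reading of B's zip-filter-map pipeline
def pvGB : Option String → List String → List String
  | _, [] => []
  | prev, t :: r => if pvKeepB prev t then t :: pvGB (some t) r else pvGB (some t) r

theorem pvZip_step (p : Option String) (t : String) (r : List String) :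
    ((p :: (t :: r).map some).zip (t :: r)) = (p, t) :: ((some t :: r.map some).zip r) := by
  simp [List.zip]

theorem pvPipeline_eq_gB : ∀ (l : List String) (p : Option String),
    (((p :: l.map some).zip l).filter (fun pt => pvKeepB pt.1 pt.2)).map (fun pt => pt.2)
      = pvGB p l := by
  intro l
  induction l with
  | nil => intro p; rfl
  | cons t r ih =>
    intro p
    rw [pvZip_step]
    by_cases h : pvKeepB p t = true
    · simp [List.filter, h, pvGB, ih (some t)]
    · simp [List.filter, h, pvGB, ih (some t)]

-- if the previous token is not a firewall flag, or the head starts with "--",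
-- the predecessor is irrelevant to pvGB
theorem pvGB_irrel (p : String) (t : String) (r : List String)
    (h : PySem.Str.startswith p "--firewall." = false ∨ PySem.Str.startswith t "--" = true) :
    pvGB (some p) (t :: r) = pvGB none (t :: r) := by
  have : pvKeepB (some p) t = pvKeepB none t := by
    simp at h
    rcases h with h | h <;> simp [pvKeepB, h]
  simp [pvGB, this]

-- a token starting with "--firewall." starts with "--"
theorem pvFw_dashes (s : String) (h : PySem.Str.startswith s "--firewall." = true) :
    PySem.Str.startswith s "--" = true := by
  simp [PySem.Chars.startswith_iff] at h ⊢
  exact List.IsPrefix.trans (by decide) h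

theorem pvLoopA_eq_gB : ∀ (n : Nat) (l : List String), l.length ≤ n →
    pvLoopA l = pvGB none l := by
  intro n
  induction n with
  | zero =>
    intro l hl
    have : l = [] := List.length_eq_zero_iff.mp (Nat.le_zero.mp hl)
    subst this; rfl
  | succ n ih =>
    intro l hl
    match l with
    | [] => rfl
    | x :: rest =>
      have hr : rest.length ≤ n := by simpa using hl
      by_cases hf : PySem.Str.startswith x "--firewall." = true
      · have hx2 : PySem.Str.startswith x "--" = true := pvFw_dashes x hf
        have hd : pvKeepB none x = false := by simp at hf; simp [pvKeepB, hf]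
        have hB : pvGB none (x :: rest) = pvGB (some x) rest := by simp [pvGB, hd]
        have hfC := hf; simp at hfC
        match rest with
        | [] => simp [pvLoopA, hfC, pvGB, hd]
        | y :: rest' =>
          by_cases hy : PySem.Str.startswith y "--" = true
          · have hyC := hy; simp at hyC
            have h1 : pvLoopA (x :: y :: rest') = pvLoopA (y :: rest') := by
              simp [pvLoopA, hfC, hyC]
            rw [hB, h1, pvGB_irrel x y rest' (Or.inr hy)]
            exact ih _ hr
          · have hy' : PySem.Str.startswith y "--" = false := by simpa using hy
            have hyC := hy'; simp at hyC
            have h1 : pvLoopA (x :: y :: rest') = pvLoopA rest' := by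
              simp [pvLoopA, hfC, hyC]
            have h2 : pvGB (some x) (y :: rest') = pvGB (some y) rest' := by
              simp [pvGB, pvKeepB, hfC, hyC]
            have hyfw : PySem.Str.startswith y "--firewall." = false := by
              by_contra hc
              simp at hc
              have := pvFw_dashes y (by simpa using hc)
              rw [this] at hy'
              exact absurd hy' (by simp)
            have h3 : pvGB (some y) rest' = pvGB none rest' := by
              match rest' with
              | [] => rfl
              | z :: r2 => exact pvGB_irrel y z r2 (Or.inl hyfw)
            rw [hB, h1, h2, h3]
            exact ih _ (by simp at hr; omega)
      · have hf' : PySem.Str.startswith x "--firewall." = false := by simpa using hf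
        have hfC := hf'; simp at hfC
        have hA : pvLoopA (x :: rest) = x :: pvLoopA rest := by
          rw [pvLoopA.eq_def]; simp [hfC]
        have hk : pvKeepB none x = true := by simp [pvKeepB, hfC]
        have hB : pvGB none (x :: rest) = x :: pvGB (some x) rest := by
          simp [pvGB, hk]
        have h3 : pvGB (some x) rest = pvGB none rest := by
          match rest with
          | [] => rfl
          | z :: r2 => exact pvGB_irrel x z r2 (Or.inl hf')
        rw [hA, hB, h3, ih rest hr]

-- ===== VERDICT (by name: the statement is the Claim_ definition above) =====
theorem update_firewall_args_spec : Claim_equal_update_firewall_args := by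
  intro l _
  unfold Spec_update_firewall_args update_firewall_args update_firewall_args_alt
  rw [pvPipeline_eq_gB]
  exact pvLoopA_eq_gB l.length l (le_refl _)
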